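-- pv_equiv track=rewrite | github.com/McDonnellJoseph/AdventOfCode | 2023/day_9.py | build_predictions
-- ===== SOURCE A (Python) =====
-- def build_predictions(value):
--     predictions = [value]
--     while sum(predictions[-1]) != 0:
--         next_line = []
--         for i in range(len(predictions[-1]) - 1):
--             next_line.append(predictions[-1][i + 1] - predictions[-1][i])
--         predictions.append(next_line)
--     return predictions
-- ===== SOURCE B (Python) =====
-- def build_predictions(value):
--     if sum(value) == 0:
--         return [value]
--     diff = [b - a for a, b in zip(value, value[1:])]
--     return [value] + build_predictions(diff)
-- ===== Notes on version B (the rewrite author's own statement) =====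
-- stated objective: simpler
-- what changed: Replaces the while-loop that maintains a growing predictions list and builds each difference row by index arithmetic over range(len-1) with a short recursion on the derived difference sequence, computing each row by zipping the list with its own tail.
import Mathlib
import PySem

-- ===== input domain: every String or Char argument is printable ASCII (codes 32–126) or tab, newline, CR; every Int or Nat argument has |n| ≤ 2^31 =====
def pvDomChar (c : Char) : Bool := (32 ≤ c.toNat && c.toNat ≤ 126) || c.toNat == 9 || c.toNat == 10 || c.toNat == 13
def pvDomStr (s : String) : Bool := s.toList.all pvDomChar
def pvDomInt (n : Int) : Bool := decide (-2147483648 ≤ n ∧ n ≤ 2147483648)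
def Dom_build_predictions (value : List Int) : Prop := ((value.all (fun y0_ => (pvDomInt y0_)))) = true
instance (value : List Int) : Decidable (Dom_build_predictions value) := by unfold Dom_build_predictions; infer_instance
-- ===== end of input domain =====

-- B replaces A's while-loop over a growing list (rows built by index arithmetic) with a
-- recursion on the difference sequence, each row obtained by zipping the list with its tail.

-- ===== PORT A =====
-- inner for-loop: next_line built by appending predictions[-1][i+1] - predictions[-1][i]
-- over range(len(predictions[-1]) - 1); indices are always in range, so pyGetD is exact here.
def pvNextLine (l : List Int) : List Int :=
  (PySem.List.pyRange 0 ((l.length : Int) - 1) 1).foldl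
    (fun acc i => acc ++ [PySem.List.pyGetD l (i + 1) 0 - PySem.List.pyGetD l i 0]) []

theorem pvNextLine_eq_map (l : List Int) :
    pvNextLine l
      = (PySem.List.pyRange 0 ((l.length : Int) - 1) 1).map
          (fun i => PySem.List.pyGetD l (i + 1) 0 - PySem.List.pyGetD l i 0) := by
  simp only [pvNextLine, PySem.List.foldl_append_singleton_eq_map, List.nil_append]

theorem pvNextLine_length (l : List Int) : (pvNextLine l).length = l.length - 1 := by
  rw [pvNextLine_eq_map]
  simp [PySem.List.length_pyRange_one]

theorem sum_ne_zero_ne_nil (l : List Int) (h : l.sum ≠ 0) : l ≠ [] := by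
  intro hnil; exact h (by simp [hnil])

-- the while-loop of A: predictions starts as [value] and gains the next difference row
-- while the last row's sum is non-zero
def pvBuildLoop (last : List Int) (acc : List (List Int)) : List (List Int) :=
  if last.sum ≠ 0 then
    pvBuildLoop (pvNextLine last) (acc ++ [pvNextLine last])
  else acc
termination_by last.length
decreasing_by
  have := pvNextLine_length last
  have := sum_ne_zero_ne_nil last (by assumption)
  have : last.length ≠ 0 := by simpa [List.length_eq_zero_iff] using this
  omega

def build_predictions (value : List Int) : List (List Int) :=
  pvBuildLoop value [value]

-- ===== PORT B =====
def pvDiff (l : List Int) : List Int :=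
  (l.zip (l.drop 1)).map (fun p => p.2 - p.1)

theorem pvDiff_length (l : List Int) : (pvDiff l).length = l.length - 1 := by
  simp [pvDiff]

def build_predictions_alt (value : List Int) : List (List Int) :=
  if value.sum = 0 then [value]
  else value :: build_predictions_alt (pvDiff value)
termination_by value.length
decreasing_by
  have := pvDiff_length value
  have := sum_ne_zero_ne_nil value (by assumption)
  have : value.length ≠ 0 := by simpa [List.length_eq_zero_iff] using this
  omega

-- ===== PRECONDITION & SPEC =====
def Spec_build_predictions (value : List Int) (out : List (List Int)) : Prop := out = build_predictions_alt value
instance (value : List Int) (out : List (List Int)) : Decidable (Spec_build_predictions value out) := by unfold Spec_build_predictions; infer_instance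

-- ===== CLAIM (what is proved, stated in full; the proofs are below) =====
def Claim_equal_build_predictions : Prop := ∀ (value : List Int), Dom_build_predictions value → Spec_build_predictions value (build_predictions value)

-- ===== LEMMAS AND PROOFS =====

theorem pvNextLine_eq_pvDiff (l : List Int) : pvNextLine l = pvDiff l := by
  rw [pvNextLine_eq_map]
  apply List.ext_getElem
  · simp [pvDiff, PySem.List.length_pyRange_one]
  · intro k h1 h2
    have hk : k < (((l.length : Int) - 1) - 0).toNat := by
      simpa [PySem.List.length_pyRange_one] using h1
    have hk' : k + 1 < l.length := by omega
    rw [List.getElem_map, PySem.List.getElem_pyRange_one]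
    simp only [pvDiff, List.getElem_map, List.getElem_zip, List.getElem_drop]
    rw [show ((0 : Int) + (k : Int) + 1) = ((k + 1 : Nat) : Int) by push_cast; ring,
        show ((0 : Int) + (k : Int)) = ((k : Nat) : Int) by push_cast; ring,
        PySem.List.pyGetD_natCast, PySem.List.pyGetD_natCast]
    have h1k : 1 + k = k + 1 := by omega
    have hk'' : k < l.length := by omega
    simp [h1k, List.getD_eq_getElem?_getD, List.getElem?_eq_getElem hk', List.getElem?_eq_getElem hk'']

theorem alt_head (l : List Int) :
    build_predictions_alt l = l :: (build_predictions_alt l).drop 1 := by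
  rw [build_predictions_alt]
  split_ifs <;> simp

theorem loop_eq (last : List Int) (acc : List (List Int)) :
    pvBuildLoop last acc = acc ++ (build_predictions_alt last).drop 1 := by
  rw [pvBuildLoop, build_predictions_alt]
  by_cases h : last.sum = 0
  · simp [h]
  · rw [if_pos h, if_neg h]
    rw [loop_eq (pvNextLine last) (acc ++ [pvNextLine last]),
        pvNextLine_eq_pvDiff, alt_head (pvDiff last)]
    simp
termination_by last.length
decreasing_by
  have := pvNextLine_length last
  have := sum_ne_zero_ne_nil last h
  have : last.length ≠ 0 := by simpa [List.length_eq_zero_iff] using this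
  omega

-- ===== VERDICT (by name: the statement is the Claim_ definition above) =====
theorem build_predictions_spec : Claim_equal_build_predictions := by
  intro value _
  unfold Spec_build_predictions build_predictions
  rw [loop_eq]
  simpa using (alt_head value).symm
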